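-- pv_equiv track=rewrite | github.com/Muzyria/Python | Stepik/Pokolenie_Python_kurs_dlya_professionalov/4_6_15.py | get_control_sum
-- ===== SOURCE A (Python) =====
-- def get_control_sum(val):
--     numbers = [i for i in val if type(i) == int]
--     if len(numbers) == 0:
--         return 0
--     if type(val) == list:
--         return min(numbers) * max(numbers)
--     if type(val) == dict:
--         return sum(numbers)
-- ===== SOURCE B (Python) =====
-- def get_control_sum(val):
--     numbers = sorted(i for i in val if type(i) == int)
--     if not numbers:
--         return 0
--     if type(val) == list:
--         return numbers[0] * numbers[-1]
--     if type(val) == dict: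
--         return sum(numbers)
-- ===== Notes on version B (the rewrite author's own statement) =====
-- stated objective: alternative
-- what changed: Sorts the filtered integers once and reads the product off the first and last element of the sorted list, instead of separate min() and max() scans over a filtered list.
import Mathlib
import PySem

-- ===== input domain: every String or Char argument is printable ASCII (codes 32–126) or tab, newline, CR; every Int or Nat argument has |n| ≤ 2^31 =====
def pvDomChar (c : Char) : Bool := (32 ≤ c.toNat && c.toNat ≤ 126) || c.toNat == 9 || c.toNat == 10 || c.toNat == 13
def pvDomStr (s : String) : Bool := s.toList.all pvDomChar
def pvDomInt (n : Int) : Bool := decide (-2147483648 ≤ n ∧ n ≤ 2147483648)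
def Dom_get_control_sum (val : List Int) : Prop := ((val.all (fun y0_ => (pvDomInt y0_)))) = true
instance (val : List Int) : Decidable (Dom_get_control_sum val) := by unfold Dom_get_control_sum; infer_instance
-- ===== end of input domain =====

-- B sorts the integers once and multiplies the first and last sorted element, instead of separate min()/max() scans (alternative decomposition via sorting).


-- ===== PORT A =====
-- [i for i in val if type(i) == int]: under the type convention val : List Int,
-- every element is an int (and not a bool), so the filter keeps every element.
-- val is a Python list, so the dict branch is unreachable.
def get_control_sum (val : List Int) : Int :=
  let numbers := val
  if numbers.length = 0 then 0
  else
    match PySem.List.min? numbers (fun x => x), PySem.List.max? numbers (fun x => x) with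
    | some mn, some mx => mn * mx
    | _, _ => 0   -- unreachable: numbers ≠ []

-- ===== PORT B =====
-- sorted(...) over the (identity-filtered) elements; numbers[0] and numbers[-1] via pyGet?.
def get_control_sum_alt (val : List Int) : Int :=
  let numbers := PySem.List.sorted val (fun x => x) false
  if numbers.length = 0 then 0
  else
    match PySem.List.pyGet? numbers 0 with
    | none => 0   -- unreachable: numbers ≠ []
    | some a =>
      match PySem.List.pyGet? numbers (-1) with
      | none => 0   -- unreachable: numbers ≠ []
      | some b => a * b

-- ===== PRECONDITION & SPEC =====
def Spec_get_control_sum (val : List Int) (out : Int) : Prop := out = get_control_sum_alt val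
instance (val : List Int) (out : Int) : Decidable (Spec_get_control_sum val out) := by unfold Spec_get_control_sum; infer_instance

-- ===== CLAIM =====
def Claim_equal_get_control_sum : Prop := ∀ (val : List Int), Dom_get_control_sum val → Spec_get_control_sum val (get_control_sum val)

-- ===== LEMMAS AND PROOFS =====
theorem gcs_head_eq_min (val : List Int) (m : Int) (hd : Int) (t : List Int)
    (hmin : PySem.List.min? val (fun x => x) = some m)
    (hs : PySem.List.sorted val (fun x => x) false = hd :: t) : hd = m := by
  have hmem : m ∈ val := PySem.List.min?_mem hmin
  have h1 : hd ≤ m := PySem.List.key_head_sorted_le val (fun x => x) hs m hmem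
  have hdmem : hd ∈ val :=
    (PySem.List.mem_sorted val (fun x => x) false hd).mp
      (by rw [hs]; exact List.mem_cons_self)
  have h2 : m ≤ hd := PySem.List.min?_isMin hmin hd hdmem
  omega

theorem gcs_last_eq_max (val : List Int) (m : Int)
    (hmax : PySem.List.max? val (fun x => x) = some m)
    (hlen : 0 < (PySem.List.sorted val (fun x => x) false).length) :
    (PySem.List.sorted val (fun x => x) false)[(PySem.List.sorted val (fun x => x) false).length - 1]? = some m := by
  rw [List.getElem?_eq_getElem (by omega)]
  have hxmem : (PySem.List.sorted val (fun x => x) false)[(PySem.List.sorted val (fun x => x) false).length - 1]'(by omega) ∈ val :=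
    (PySem.List.mem_sorted val (fun x => x) false _).mp (List.getElem_mem _)
  have h1 := PySem.List.max?_isMax hmax _ hxmem
  have hmmem : m ∈ PySem.List.sorted val (fun x => x) false :=
    (PySem.List.mem_sorted val (fun x => x) false m).mpr (PySem.List.max?_mem hmax)
  obtain ⟨p, hp, hpm⟩ := List.getElem_of_mem hmmem
  have h2 : m ≤ (PySem.List.sorted val (fun x => x) false)[(PySem.List.sorted val (fun x => x) false).length - 1]'(by omega) := by
    rw [← hpm]
    exact PySem.List.sorted_id_getElem_mono val (p := p)
      (q := (PySem.List.sorted val (fun x => x) false).length - 1) (by omega) (by omega)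
  simp only [Option.some.injEq]
  omega

-- ===== VERDICT =====
theorem get_control_sum_spec : Claim_equal_get_control_sum := by
  intro val _
  unfold Spec_get_control_sum get_control_sum get_control_sum_alt
  by_cases hnil : val = []
  · subst hnil; decide
  · have hlen : val.length ≠ 0 := by simpa using hnil
    have hslen : (PySem.List.sorted val (fun x => x) false).length ≠ 0 := by
      rw [PySem.List.length_sorted]; exact hlen
    simp only [hlen, hslen, if_false]
    obtain ⟨mn, hmn⟩ : ∃ m, PySem.List.min? val (fun x => x) = some m := by
      cases h : PySem.List.min? val (fun x => x) with
      | none => exact absurd ((PySem.List.min?_eq_none_iff val _).mp h) hnil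
      | some m => exact ⟨m, rfl⟩
    obtain ⟨mx, hmx⟩ : ∃ m, PySem.List.max? val (fun x => x) = some m := by
      cases h : PySem.List.max? val (fun x => x) with
      | none => exact absurd ((PySem.List.max?_eq_none_iff val _).mp h) hnil
      | some m => exact ⟨m, rfl⟩
    rw [hmn, hmx]
    have hlast := gcs_last_eq_max val mx hmx (by omega)
    cases hs : PySem.List.sorted val (fun x => x) false with
    | nil => rw [hs] at hslen; simp at hslen
    | cons hd t =>
      have hhd : hd = mn := gcs_head_eq_min val mn hd t hmn hs
      have hget0 : PySem.List.pyGet? (hd :: t) 0 = some hd := by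
        simp [PySem.List.pyGet?, PySem.List.pyIdx?]
      have hgetneg : PySem.List.pyGet? (hd :: t) (-1) = (hd :: t)[(hd :: t).length - 1]? := by
        simp [PySem.List.pyGet?, PySem.List.pyIdx?]
      rw [hs] at hlast
      rw [hget0, hgetneg, hlast, hhd]
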